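-- pv_equiv track=rewrite | github.com/WasimTTY/epicyon | utils.py | get_image_mime_type
-- ===== SOURCE A (Python) =====
-- def get_image_mime_type(image_filename: str) -> str:
--     """Returns the mime type for the given image
--     """
--     extensions_to_mime = {
--         'png': 'png',
--         'jpg': 'jpeg',
--         'gif': 'gif',
--         'avif': 'avif',
--         'svg': 'svg+xml',
--         'webp': 'webp',
--         'ico': 'x-icon'
--     }
--     for ext, mime_ext in extensions_to_mime.items():
--         if image_filename.endswith('.' + ext):
--             return 'image/' + mime_ext
--     return 'image/png'
-- ===== SOURCE B (Python) =====
-- def get_image_mime_type(image_filename: str) -> str: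
--     """Returns the mime type for the given image
--     """
--     extensions_to_mime = {
--         'png': 'png',
--         'jpg': 'jpeg',
--         'gif': 'gif',
--         'avif': 'avif',
--         'svg': 'svg+xml',
--         'webp': 'webp',
--         'ico': 'x-icon'
--     }
--     _base, dot, ext = image_filename.rpartition('.')
--     if dot and ext in extensions_to_mime:
--         return 'image/' + extensions_to_mime[ext]
--     return 'image/png'
-- ===== Notes on version B (the rewrite author's own statement) =====
-- stated objective: idiomatic
-- what changed: A probes the filename with endswith once per dict entry; B extracts the extension after the last dot with one rpartition call and resolves it with a single dict lookup.
import Mathlib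
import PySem

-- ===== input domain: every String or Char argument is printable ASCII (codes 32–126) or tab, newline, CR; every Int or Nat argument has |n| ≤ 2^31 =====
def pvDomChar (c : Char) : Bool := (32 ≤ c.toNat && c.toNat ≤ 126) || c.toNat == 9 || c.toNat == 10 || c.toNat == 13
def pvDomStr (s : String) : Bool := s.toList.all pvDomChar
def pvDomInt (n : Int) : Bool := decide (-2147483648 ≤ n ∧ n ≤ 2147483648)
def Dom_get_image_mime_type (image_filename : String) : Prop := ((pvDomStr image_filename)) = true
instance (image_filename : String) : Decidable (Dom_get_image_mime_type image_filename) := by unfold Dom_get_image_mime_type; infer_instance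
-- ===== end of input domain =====

-- B replaces A's seven per-extension endswith probes by one rpartition at the last
-- dot followed by a single dict lookup (objective: idiomatic).

-- ===== PORT A =====
-- the extensions_to_mime dict of A, as the (ext, mime_ext) pairs its .items() yields
def pvMimeItems : List (String × String) :=
  [("png", "png"), ("jpg", "jpeg"), ("gif", "gif"), ("avif", "avif"),
   ("svg", "svg+xml"), ("webp", "webp"), ("ico", "x-icon")]

-- A's loop: for ext, mime_ext in extensions_to_mime.items(): if image_filename.endswith('.' + ext): return 'image/' + mime_ext
def pvGoA (s : String) : List (String × String) → String
  | [] => "image/png"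
  | (ext, mime_ext) :: rest =>
      if PySem.Str.endswith s ("." ++ ext) then "image/" ++ mime_ext else pvGoA s rest

def get_image_mime_type (image_filename : String) : String :=
  pvGoA image_filename pvMimeItems

-- ===== PORT B =====
-- B's extensions_to_mime dict
def pvMimeDict : PySem.Dict String String :=
  PySem.Dict.ofList
    [("png", "png"), ("jpg", "jpeg"), ("gif", "gif"), ("avif", "avif"),
     ("svg", "svg+xml"), ("webp", "webp"), ("ico", "x-icon")]

-- the part of image_filename.rpartition('.') that B uses: some ext when a '.' exists
-- (ext = the characters after the LAST '.'), none when the separator is absent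
def pvRpartExt : List Char → Option (List Char)
  | [] => none
  | c :: rest =>
      match pvRpartExt rest with
      | some e => some e
      | none => if c = '.' then some rest else none

-- B: _base, dot, ext = image_filename.rpartition('.'); if dot and ext in d: …
def get_image_mime_type_alt (image_filename : String) : String :=
  match pvRpartExt image_filename.toList with
  | none => "image/png"
  | some ext =>
      match PySem.Dict.get? pvMimeDict (String.ofList ext) with
      | some mime_ext => "image/" ++ mime_ext
      | none => "image/png"

-- ===== PRECONDITION & SPEC =====
def Spec_get_image_mime_type (image_filename : String) (out : String) : Prop := out = get_image_mime_type_alt image_filename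
instance (image_filename : String) (out : String) : Decidable (Spec_get_image_mime_type image_filename out) := by unfold Spec_get_image_mime_type; infer_instance

-- ===== CLAIM (what is proved, stated in full; the proofs are below) =====
def Claim_equal_get_image_mime_type : Prop := ∀ (image_filename : String), Dom_get_image_mime_type image_filename → Spec_get_image_mime_type image_filename (get_image_mime_type image_filename)

-- ===== LEMMAS AND PROOFS =====

-- a pattern 'b ++ [.]' with dot-free b is a prefix of 'a ++ . :: t' with dot-free a iff b = a
lemma pv_prefix_dot (a : List Char) : ∀ (b t : List Char), '.' ∉ a → '.' ∉ b →
    ((b ++ ['.']) <+: (a ++ '.' :: t) ↔ b = a) := by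
  induction a with
  | nil =>
      intro b t _ hb
      cases b with
      | nil => simp
      | cons c b' =>
          constructor
          · rintro ⟨w, hw⟩
            have hc : c = '.' := by have := congrArg (·.head?) hw; simpa using this
            exact absurd (hc ▸ List.mem_cons_self) hb
          · intro h; cases h
  | cons x a' ih =>
      intro b t ha hb
      cases b with
      | nil =>
          constructor
          · rintro ⟨w, hw⟩
            have hc : '.' = x := by have := congrArg (·.head?) hw; simpa using this
            exact absurd (hc ▸ List.mem_cons_self) ha
          · intro h; cases h
      | cons c b' =>
          constructor
          · rintro ⟨w, hw⟩
            simp only [List.cons_append] at hw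
            obtain ⟨h1, h2⟩ := List.cons.inj hw
            have := (ih b' t (fun h => ha (List.mem_cons_of_mem _ h))
              (fun h => hb (List.mem_cons_of_mem _ h))).mp ⟨w, h2⟩
            simp [h1, this]
          · intro h
            injection h with h1 h2
            subst h1; subst h2
            have := (ih b' t (fun h => ha (List.mem_cons_of_mem _ h))
              (fun h => hb (List.mem_cons_of_mem _ h))).mpr rfl
            obtain ⟨w, hw⟩ := this
            exact ⟨w, by simp [hw]⟩

-- A's '.'-headed endswith test on a string whose last dot splits it as u ++ '.' :: acc
lemma pv_endswith_dot (u acc e : List Char) (hacc : '.' ∉ acc) (he : '.' ∉ e) :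
    (PySem.Chars.endswith (u ++ '.' :: acc) ('.' :: e) = true) ↔ e = acc := by
  rw [PySem.Chars.endswith_iff]
  constructor
  · intro h
    have h' : ('.' :: e).reverse <+: (u ++ '.' :: acc).reverse :=
      List.reverse_prefix.mpr h
    simp only [List.reverse_cons, List.reverse_append,
      List.append_assoc, List.singleton_append] at h'
    have h2 := (pv_prefix_dot acc.reverse e.reverse u.reverse (by simpa using hacc)
      (by simpa using he)).mp h'
    have := congrArg List.reverse h2
    simpa using this
  · rintro rfl
    exact ⟨u, by simp⟩

-- no dot in the string ⇒ every '.'-headed endswith test of A fails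
lemma pv_endswith_no_dot (l e : List Char) (hl : '.' ∉ l) :
    PySem.Chars.endswith l ('.' :: e) = false := by
  cases hb : PySem.Chars.endswith l ('.' :: e) with
  | false => rfl
  | true =>
      exact absurd (((PySem.Chars.endswith_iff l ('.' :: e)).mp hb).sublist.subset
        List.mem_cons_self) hl

-- dot-free strings have no rpartition extension
lemma pv_rpart_no_dot (l : List Char) (hl : '.' ∉ l) : pvRpartExt l = none := by
  induction l with
  | nil => rfl
  | cons c rest ih =>
      have hc : ¬ c = '.' := fun h => hl (h ▸ List.mem_cons_self)
      simp [pvRpartExt, ih (fun h => hl (List.mem_cons_of_mem _ h)), hc]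

-- rpartition extension of a string whose LAST dot splits it as u ++ '.' :: acc
lemma pv_rpart_dot (u acc : List Char) (hacc : '.' ∉ acc) :
    pvRpartExt (u ++ '.' :: acc) = some acc := by
  induction u with
  | nil => simp [pvRpartExt, pv_rpart_no_dot acc hacc]
  | cons c rest ih => simp [pvRpartExt, ih]

-- every list containing a dot splits at its LAST dot
lemma pv_split_last_dot (l : List Char) (hl : '.' ∈ l) :
    ∃ u acc, l = u ++ '.' :: acc ∧ '.' ∉ acc := by
  induction l with
  | nil => cases hl
  | cons c rest ih =>
      by_cases hr : '.' ∈ rest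
      · obtain ⟨u, acc, h1, h2⟩ := ih hr
        exact ⟨c :: u, acc, by simp [h1], h2⟩
      · have hc : c = '.' := by
          rcases List.mem_cons.mp hl with h | h
          · exact h.symm
          · exact absurd h hr
        exact ⟨[], rest, by simp [hc], hr⟩

-- B's single dict lookup, written out as the decision chain on the key's characters
lemma pv_lookup (x : List Char) :
    PySem.Dict.get? pvMimeDict (String.ofList x) =
      if ['p','n','g'] = x then some "png"
      else if ['j','p','g'] = x then some "jpeg"
      else if ['g','i','f'] = x then some "gif"
      else if ['a','v','i','f'] = x then some "avif"
      else if ['s','v','g'] = x then some "svg+xml"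
      else if ['w','e','b','p'] = x then some "webp"
      else if ['i','c','o'] = x then some "x-icon"
      else none := by
  have key : ∀ t : String, (t == String.ofList x) = decide (t.toList = x) := by
    intro t
    by_cases he : t = String.ofList x
    · simp [he]
    · have hx : t.toList ≠ x := fun hx => he (String.toList_inj.mp (by simpa using hx))
      simp [he, hx]
  have hd : pvMimeDict = PySem.Dict.mk
      [("png", "png"), ("jpg", "jpeg"), ("gif", "gif"), ("avif", "avif"),
       ("svg", "svg+xml"), ("webp", "webp"), ("ico", "x-icon")] := by decide
  rw [hd]
  simp only [PySem.Dict.get?_mk_cons, key, decide_eq_true_eq, String.reduceToList]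
  have hnil : (PySem.Dict.mk ([] : List (String × String))).get? (String.ofList x) = none := rfl
  rw [hnil]

-- ===== VERDICT (by name: the statement is the Claim_ definition above) =====
theorem get_image_mime_type_spec : Claim_equal_get_image_mime_type := by
  intro s _
  unfold Spec_get_image_mime_type get_image_mime_type get_image_mime_type_alt
  have hs : s = String.ofList s.toList := String.toList_inj.mp (by simp)
  rw [hs]
  by_cases hdot : '.' ∈ s.toList
  · obtain ⟨u, acc, hsplit, hacc⟩ := pv_split_last_dot s.toList hdot
    rw [hsplit, String.toList_ofList, pv_rpart_dot u acc hacc]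
    simp only []
    rw [pv_lookup]
    simp only [pvGoA, pvMimeItems, PySem.Str.endswith_eq, String.toList_ofList,
      String.toList_append, String.reduceToList, List.cons_append, List.nil_append]
    simp only [pv_endswith_dot u acc ['p','n','g'] hacc (by decide),
      pv_endswith_dot u acc ['j','p','g'] hacc (by decide),
      pv_endswith_dot u acc ['g','i','f'] hacc (by decide),
      pv_endswith_dot u acc ['a','v','i','f'] hacc (by decide),
      pv_endswith_dot u acc ['s','v','g'] hacc (by decide),
      pv_endswith_dot u acc ['w','e','b','p'] hacc (by decide),
      pv_endswith_dot u acc ['i','c','o'] hacc (by decide)]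
    split_ifs <;> rfl
  · rw [String.toList_ofList, pv_rpart_no_dot s.toList hdot]
    simp only [pvGoA, pvMimeItems, PySem.Str.endswith_eq, String.toList_ofList,
      String.toList_append, String.reduceToList, List.cons_append, List.nil_append]
    simp only [pv_endswith_no_dot s.toList _ hdot]
    simp
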